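-- pv_equiv track=rewrite | github.com/SanMaBruno/cronologia-conflictos-mundiales | scripts/regenerate_ucdp_data.py | get_active_range
-- ===== SOURCE A (Python) =====
-- def get_active_range(ucdp, entity, year_start=2015, year_end=2024):
--     """Get first and last year with >0 deaths."""
--     first, last = None, None
--     for y in range(year_start, year_end + 1):
--         d = ucdp.get(entity, {}).get(y, 0)
--         if d > 0:
--             if first is None:
--                 first = y
--             last = y
--     return first, last
-- ===== SOURCE B (Python) =====
-- def get_active_range(ucdp, entity, year_start=2015, year_end=2024):
--     """Get first and last year with >0 deaths."""
--     yearly = ucdp.get(entity, {})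
--     active = [y for y, d in yearly.items() if year_start <= y <= year_end and d > 0]
--     if not active:
--         return None, None
--     return min(active), max(active)
-- ===== Notes on version B (the rewrite author's own statement) =====
-- stated objective: alternative
-- what changed: Instead of scanning every year of the range while threading first/last state, B looks up the entity's dict once, iterates over its stored (year, deaths) entries collecting in-bounds years with deaths > 0, and returns min/max of that collection, which is order-independent.
import Mathlib
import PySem

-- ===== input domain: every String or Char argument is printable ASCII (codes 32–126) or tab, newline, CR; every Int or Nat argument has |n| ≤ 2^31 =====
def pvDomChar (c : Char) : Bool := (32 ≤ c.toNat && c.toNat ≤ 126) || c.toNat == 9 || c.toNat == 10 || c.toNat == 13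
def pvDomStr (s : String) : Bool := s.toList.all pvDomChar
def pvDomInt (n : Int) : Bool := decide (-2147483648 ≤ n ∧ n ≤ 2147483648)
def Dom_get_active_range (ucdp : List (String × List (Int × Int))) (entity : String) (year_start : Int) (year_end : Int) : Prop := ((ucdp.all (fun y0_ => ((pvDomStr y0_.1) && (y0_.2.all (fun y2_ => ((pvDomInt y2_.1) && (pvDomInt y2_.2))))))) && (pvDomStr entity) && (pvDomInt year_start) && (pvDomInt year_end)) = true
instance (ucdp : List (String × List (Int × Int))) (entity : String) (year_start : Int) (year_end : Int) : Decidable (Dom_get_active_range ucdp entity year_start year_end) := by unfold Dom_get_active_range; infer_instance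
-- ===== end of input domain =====

-- B replaces A's scan over the whole year range (threading first/last state) by a single
-- dict lookup plus a pass over the stored (year, deaths) entries, returning min/max of the
-- collected in-bounds active years: an alternative traversal over the data, not the range.


-- ===== PORT A =====
-- shared helper: d.get(k, dflt) on an association list (first match)
def pvAssocGetD {κ ν : Type} [BEq κ] (xs : List (κ × ν)) (k : κ) (dflt : ν) : ν :=
  match xs.find? (fun p => p.1 == k) with
  | some p => p.2
  | none => dflt

-- ucdp.get(entity, {}).get(y, 0)
def pvDeaths (ucdp : List (String × List (Int × Int))) (entity : String) (y : Int) : Int :=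
  pvAssocGetD (pvAssocGetD ucdp entity []) y 0

def get_active_range (ucdp : List (String × List (Int × Int))) (entity : String) (year_start : Int) (year_end : Int) : Option Int × Option Int :=
  (PySem.List.pyRange year_start (year_end + 1) 1).foldl
    (fun st y =>
      let d := pvDeaths ucdp entity y
      if d > 0 then ((if st.1 = none then some y else st.1), some y) else st)
    (none, none)

-- ===== PORT B =====
def get_active_range_alt (ucdp : List (String × List (Int × Int))) (entity : String) (year_start : Int) (year_end : Int) : Option Int × Option Int :=
  let yearly := pvAssocGetD ucdp entity []
  let active := (yearly.filter
      (fun p => year_start ≤ p.1 ∧ p.1 ≤ year_end ∧ p.2 > 0)).map Prod.fst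
  if active.isEmpty then (none, none)
  else (PySem.List.min? active (fun y => y), PySem.List.max? active (fun y => y))

-- ===== PRECONDITION & SPEC =====
-- Pre_ excludes association lists whose inner year lists carry a duplicate key: such a list
-- represents no Python dict (dicts cannot hold duplicate keys), and on it A's first-match
-- lookup and B's iteration over all entries are both accidental readings.
def Pre_get_active_range (ucdp : List (String × List (Int × Int))) (entity : String) (year_start : Int) (year_end : Int) : Prop :=
  ∀ p ∈ ucdp, (p.2.map Prod.fst).Nodup
instance (ucdp : List (String × List (Int × Int))) (entity : String) (year_start : Int) (year_end : Int) : Decidable (Pre_get_active_range ucdp entity year_start year_end) := by unfold Pre_get_active_range; infer_instance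

def pvWitness_get_active_range : (List (String × List (Int × Int))) × String × Int × Int :=
  ([("x", [(2020, 5), (2022, 0), (2023, 3)])], "x", 2015, 2024)

def Spec_get_active_range (ucdp : List (String × List (Int × Int))) (entity : String) (year_start : Int) (year_end : Int) (out : Option Int × Option Int) : Prop := out = get_active_range_alt ucdp entity year_start year_end
instance (ucdp : List (String × List (Int × Int))) (entity : String) (year_start : Int) (year_end : Int) (out : Option Int × Option Int) : Decidable (Spec_get_active_range ucdp entity year_start year_end out) := by unfold Spec_get_active_range; infer_instance

-- ===== CLAIM =====
def Claim_equal_get_active_range : Prop := ∀ (ucdp : List (String × List (Int × Int))) (entity : String) (year_start : Int) (year_end : Int), Dom_get_active_range ucdp entity year_start year_end → Pre_get_active_range ucdp entity year_start year_end → Spec_get_active_range ucdp entity year_start year_end (get_active_range ucdp entity year_start year_end)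

-- ===== LEMMAS AND PROOFS =====

-- A's loop over any list, from any state, computes the filtered list's endpoints.
theorem loop_eq (f : Int → Int) (l : List Int) (f1 f2 : Option Int) :
    l.foldl (fun st y => if f y > 0 then ((if st.1 = none then some y else st.1), some y) else st) (f1, f2)
    = ((match f1 with | none => (l.filter (fun y => f y > 0)).head? | some v => some v),
       (match (l.filter (fun y => f y > 0)).getLast? with | none => f2 | some v => some v)) := by
  induction l generalizing f1 f2 with
  | nil => cases f1 <;> simp
  | cons y t ih =>
    by_cases hp : f y > 0
    · rw [List.foldl_cons, if_pos hp, ih]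
      cases f1
      · cases h : (t.filter (fun y => f y > 0)).getLast? <;>
          simp [hp, h, List.getLast?_cons]
      · cases h : (t.filter (fun y => f y > 0)).getLast? <;>
          simp [hp, h, List.getLast?_cons]
    · rw [List.foldl_cons, if_neg hp, ih]
      simp [hp]

-- With nodup keys, first-match lookup is positive iff some entry with that key is positive.
theorem assoc_pos_iff (l : List (Int × Int)) (h : (l.map Prod.fst).Nodup) (y : Int) :
    pvAssocGetD l y 0 > 0 ↔ ∃ d, (y, d) ∈ l ∧ d > 0 := by
  induction l with
  | nil => simp [pvAssocGetD]
  | cons p t ih =>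
    obtain ⟨k, v⟩ := p
    simp only [List.map_cons, List.nodup_cons] at h
    by_cases hk : k = y
    · subst hk
      have hget : pvAssocGetD ((k, v) :: t) k 0 = v := by simp [pvAssocGetD]
      rw [hget]
      constructor
      · intro hv; exact ⟨v, List.mem_cons_self .., hv⟩
      · rintro ⟨d, hm, hd⟩
        rcases List.mem_cons.mp hm with heq | hmt
        · obtain ⟨-, rfl⟩ := Prod.mk.injEq .. ▸ heq; exact hd
        · exact absurd (List.mem_map.mpr ⟨(k, d), hmt, rfl⟩) h.1
    · have hget : pvAssocGetD ((k, v) :: t) y 0 = pvAssocGetD t y 0 := by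
        simp [pvAssocGetD, hk]
      rw [hget, ih h.2]
      constructor
      · rintro ⟨d, hm, hd⟩; exact ⟨d, List.mem_cons_of_mem _ hm, hd⟩
      · rintro ⟨d, hm, hd⟩
        rcases List.mem_cons.mp hm with heq | hmt
        · exact absurd (congrArg Prod.fst heq).symm hk
        · exact ⟨d, hmt, hd⟩

-- membership in B's collected list ↔ membership in A's filtered range
theorem mem_active_iff (yearly : List (Int × Int)) (h : (yearly.map Prod.fst).Nodup)
    (ys ye y : Int) :
    y ∈ (yearly.filter (fun p => ys ≤ p.1 ∧ p.1 ≤ ye ∧ p.2 > 0)).map Prod.fst ↔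
    y ∈ (PySem.List.pyRange ys (ye + 1) 1).filter (fun z => pvAssocGetD yearly z 0 > 0) := by
  simp only [List.mem_map, List.mem_filter, PySem.List.mem_pyRange_one]
  constructor
  · rintro ⟨⟨z, d⟩, hpf, rfl⟩
    simp only [decide_eq_true_eq] at hpf
    obtain ⟨hm, h1, h2, h3⟩ := hpf
    exact ⟨⟨h1, by omega⟩, by
      simp only [decide_eq_true_eq]
      exact (assoc_pos_iff yearly h z).mpr ⟨d, hm, h3⟩⟩
  · rintro ⟨⟨h1, h2⟩, hpos⟩
    simp only [decide_eq_true_eq] at hpos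
    obtain ⟨d, hm, hd⟩ := (assoc_pos_iff yearly h y).mp hpos
    exact ⟨(y, d), by
      simp only [decide_eq_true_eq]
      exact ⟨hm, h1, by omega, hd⟩, rfl⟩

-- on a strictly increasing list, the last element bounds everything
theorem le_getLast_of_pairwise : ∀ (l : List Int), l.Pairwise (· < ·) →
    ∀ x m : Int, x ∈ l → l.getLast? = some m → x ≤ m := by
  intro l
  induction l with
  | nil => intro _ x m hx _; simp at hx
  | cons a t ih =>
    intro hs x m hx hm
    cases t with
    | nil => simp at hx hm; omega
    | cons b u =>
      rw [List.getLast?_cons_cons] at hm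
      have hpt := (List.pairwise_cons.mp hs).2
      rcases List.mem_cons.mp hx with rfl | hx'
      · have hab : x < b := (List.pairwise_cons.mp hs).1 b (List.mem_cons_self ..)
        have hb : b ≤ m := ih hpt b m (List.mem_cons_self ..) hm
        omega
      · exact ih hpt x m hx' hm

-- min/max of a list with the same members as a strictly increasing list = its endpoints
theorem minmax_eq_endpoints (l l' : List Int) (hs : l.Pairwise (· < ·))
    (hmem : ∀ y, y ∈ l' ↔ y ∈ l) :
    PySem.List.min? l' (fun y => y) = l.head? ∧
    PySem.List.max? l' (fun y => y) = l.getLast? := by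
  cases l with
  | nil =>
    have hnil : l' = [] := by
      cases l' with
      | nil => rfl
      | cons a t => exact absurd ((hmem a).mp (by simp)) (by simp)
    subst hnil
    exact ⟨(PySem.List.min?_eq_none_iff _ _).mpr rfl,
           (PySem.List.max?_eq_none_iff _ _).mpr rfl⟩
  | cons a t =>
    have ha : a ∈ l' := (hmem a).mpr (by simp)
    have hne : l' ≠ [] := by intro h; subst h; simp at ha
    constructor
    · cases hmin : PySem.List.min? l' (fun y => y) with
      | none => exact absurd ((PySem.List.min?_eq_none_iff _ _).mp hmin) hne
      | some m =>
        have hm : m ∈ a :: t := (hmem m).mp (PySem.List.min?_mem hmin)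
        have h1 : m ≤ a := PySem.List.min?_isMin hmin a ha
        have h2 : a ≤ m := by
          rcases List.mem_cons.mp hm with rfl | hmt
          · exact le_refl _
          · exact le_of_lt ((List.pairwise_cons.mp hs).1 m hmt)
        rw [show m = a from le_antisymm h1 h2]
        simp
    · cases hlast : (a :: t).getLast? with
      | none => simp at hlast
      | some z =>
        cases hmax : PySem.List.max? l' (fun y => y) with
        | none => exact absurd ((PySem.List.max?_eq_none_iff _ _).mp hmax) hne
        | some M =>
          have hM : M ∈ a :: t := (hmem M).mp (PySem.List.max?_mem hmax)
          have h1 : M ≤ z := le_getLast_of_pairwise _ hs M z hM hlast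
          have hz : z ∈ a :: t := List.mem_of_getLast? hlast
          have h2 : z ≤ M := PySem.List.max?_isMax hmax z ((hmem z).mpr hz)
          rw [show M = z from le_antisymm h1 h2]

-- ===== VERDICT =====
theorem get_active_range_spec : Claim_equal_get_active_range := by
  intro ucdp entity ys ye _ hpre
  unfold Spec_get_active_range
  have hnodup : ((pvAssocGetD ucdp entity ([] : List (Int × Int))).map Prod.fst).Nodup := by
    unfold pvAssocGetD
    cases hf : ucdp.find? (fun p => p.1 == entity) with
    | none => simp
    | some p => exact hpre p (List.mem_of_find?_eq_some hf)
  set yearly := pvAssocGetD ucdp entity ([] : List (Int × Int)) with hy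
  set active := (yearly.filter
      (fun p => ys ≤ p.1 ∧ p.1 ≤ ye ∧ p.2 > 0)).map Prod.fst with hA
  set L := (PySem.List.pyRange ys (ye + 1) 1).filter
      (fun z => decide (pvDeaths ucdp entity z > 0)) with hL
  have halt : get_active_range_alt ucdp entity ys ye =
      (PySem.List.min? active (fun y => y), PySem.List.max? active (fun y => y)) := by
    show (if active.isEmpty then (none, none)
          else (PySem.List.min? active (fun y => y), PySem.List.max? active (fun y => y)))
        = (PySem.List.min? active (fun y => y), PySem.List.max? active (fun y => y))
    by_cases h : active = []
    · rw [h]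
      exact if_pos rfl
    · rw [if_neg (by simpa [List.isEmpty_iff] using h)]
  have hmem : ∀ y, y ∈ active ↔ y ∈ L := by
    intro y
    have := mem_active_iff yearly hnodup ys ye y
    simpa [hA, hL, pvDeaths, ← hy] using this
  obtain ⟨hmin, hmax⟩ := minmax_eq_endpoints L active
    (List.Pairwise.filter _ (PySem.List.pairwise_lt_pyRange_one ys (ye + 1))) hmem
  rw [halt, hmin, hmax]
  show get_active_range ucdp entity ys ye = (L.head?, L.getLast?)
  unfold get_active_range
  rw [loop_eq (pvDeaths ucdp entity) (PySem.List.pyRange ys (ye + 1) 1) none none]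
  cases h2 : L.getLast? with
  | none => simp [← hL]
  | some v => simp [← hL]
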